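-- pv_equiv track=rewrite | github.com/leowcy/Algorithm | LeetCode/easy/check-row-col-contains-all-num.py | Solution
-- ===== SOURCE A (Python) =====
-- from collections import Counter
--
-- def Solution(m: list[list[int]]) -> bool:
--     n = len(m)
--     for row in m:
--         cnt = Counter(row)
--         if len(cnt) != n:
--             return False
--
--     for i in range(n):
--         temp = []
--         for j in range(n):
--             temp.append(m[j][i])
--         cnt = Counter(temp)
--         if len(cnt) != n:
--             return False
--
--     return True
-- ===== SOURCE B (Python) =====
-- def Solution(m: list[list[int]]) -> bool:
--     n = len(m)
--     cols_seen = [set() for _ in range(n)]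
--     for row in m:
--         if len(set(row)) != n:
--             return False
--         for v, s in zip(row, cols_seen):
--             if v in s:
--                 return False
--             s.add(v)
--     return True
-- ===== Notes on version B (the rewrite author's own statement) =====
-- stated objective: alternative
-- what changed: Replaces A's two separate Counter passes (rows, then each column materialised by an inner index loop) with a single row-by-row sweep that checks each row's distinct count directly and maintains incremental per-column seen-sets, detecting column duplicates at insertion time.
import Mathlib
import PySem

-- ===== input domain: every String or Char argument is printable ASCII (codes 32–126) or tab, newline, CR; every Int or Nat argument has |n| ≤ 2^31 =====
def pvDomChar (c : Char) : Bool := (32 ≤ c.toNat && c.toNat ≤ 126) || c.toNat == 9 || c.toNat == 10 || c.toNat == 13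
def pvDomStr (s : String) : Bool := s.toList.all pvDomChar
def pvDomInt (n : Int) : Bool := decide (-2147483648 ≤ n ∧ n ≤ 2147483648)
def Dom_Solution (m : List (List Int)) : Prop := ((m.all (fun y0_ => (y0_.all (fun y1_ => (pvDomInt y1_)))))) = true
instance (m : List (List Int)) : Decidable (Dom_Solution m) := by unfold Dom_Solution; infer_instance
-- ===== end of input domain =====

-- B replaces A's two Counter passes by one row-by-row sweep with a per-row distinct-count check and incremental per-column seen-sets (alternative decomposition, same asymptotic cost).

-- ===== PORT A =====
-- first loop: 'for row in m: cnt = Counter(row); if len(cnt) != n: return False'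
def pvRowPass (n : Nat) : List (List Int) → Bool
  | [] => true
  | row :: rest =>
    let cnt := PySem.Dict.counter row
    if cnt.size ≠ n then false else pvRowPass n rest

-- second loop: 'for i in range(n): temp = []; for j in range(n): temp.append(m[j][i]); cnt = Counter(temp); …'
-- m[j][i] is ported as pyGetD: when the row pass succeeded every row has ≥ n distinct values,
-- hence length ≥ n, so the Python indexing is in range and never raises (A is total).
def pvColPass (m : List (List Int)) (n : Nat) : List Int → Bool
  | [] => true
  | i :: rest =>
    let temp := (PySem.List.pyRange 0 (n : Int) 1).foldl
      (fun t j => t ++ [PySem.List.pyGetD (PySem.List.pyGetD m j []) i 0]) []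
    let cnt := PySem.Dict.counter temp
    if cnt.size ≠ n then false else pvColPass m n rest

def Solution (m : List (List Int)) : Bool :=
  let n := m.length
  if pvRowPass n m then pvColPass m n (PySem.List.pyRange 0 (n : Int) 1) else false

-- ===== PORT B =====
-- inner loop: 'for v, s in zip(row, cols_seen): …' — returns the updated cols_seen, none = early 'return False'
def pvScanRow : List Int → List (PySem.Set Int) → Option (List (PySem.Set Int))
  | [], cs => some cs
  | _ :: _, [] => some []
  | v :: vs, s :: cs =>
    if PySem.Set.contains s v then none
    else (pvScanRow vs cs).map (fun cs' => PySem.Set.add s v :: cs')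

-- outer loop: 'for row in m: if len(set(row)) != n: return False; …'
def pvScanAll (n : Nat) : List (List Int) → List (PySem.Set Int) → Bool
  | [], _ => true
  | row :: rest, cs =>
    if (PySem.Set.ofList row).length ≠ n then false
    else
      match pvScanRow row cs with
      | none => false
      | some cs' => pvScanAll n rest cs'

def Solution_alt (m : List (List Int)) : Bool :=
  pvScanAll m.length m ((List.range m.length).map (fun _ => PySem.Set.empty))

-- ===== PRECONDITION & SPEC =====
def Spec_Solution (m : List (List Int)) (out : Bool) : Prop := out = Solution_alt m
instance (m : List (List Int)) (out : Bool) : Decidable (Spec_Solution m out) := by unfold Spec_Solution; infer_instance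

-- ===== CLAIM (what is proved, stated in full; the proofs are below) =====
def Claim_equal_Solution : Prop := ∀ (m : List (List Int)), Dom_Solution m → Spec_Solution m (Solution m)

-- ===== LEMMAS AND PROOFS =====

-- distinct count equals length iff no duplicates
theorem pv_lenOfList_eq_iff (xs : List Int) :
    (PySem.Set.ofList xs).length = xs.length ↔ xs.Nodup := by
  have hperm : (PySem.Set.ofList xs).Perm xs.dedup := by
    refine (List.perm_ext_iff_of_nodup (PySem.Set.nodup_ofList xs) xs.nodup_dedup).mpr ?_
    intro a; simp [PySem.Set.mem_ofList, List.mem_dedup]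
  rw [hperm.length_eq]
  constructor
  · intro h
    have := (xs.dedup_sublist).eq_of_length h
    rw [← this]; exact xs.nodup_dedup
  · intro h; rw [List.dedup_eq_self.mpr h]

theorem pv_counter_size (xs : List Int) :
    (PySem.Dict.counter xs).size = (PySem.Set.ofList xs).length := by
  have h := PySem.Dict.keys_counter (xs := xs)
  have : (PySem.Dict.counter xs).keys.length = (PySem.Set.ofList xs).length := by rw [h]
  simpa [PySem.Dict.keys, PySem.Dict.size] using this

theorem pv_rowPass_iff (n : Nat) (rows : List (List Int)) :
    pvRowPass n rows = true ↔ ∀ row ∈ rows, (PySem.Dict.counter row).size = n := by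
  induction rows with
  | nil => simp [pvRowPass]
  | cons row rest ih => simp [pvRowPass]; by_cases h : (PySem.Dict.counter row).size = n <;> simp [h, ih]

theorem pv_colPass_iff (m : List (List Int)) (n : Nat) (is : List Int) :
    pvColPass m n is = true ↔ ∀ i ∈ is,
      (PySem.Dict.counter ((PySem.List.pyRange 0 (n : Int) 1).foldl
        (fun t j => t ++ [PySem.List.pyGetD (PySem.List.pyGetD m j []) i 0]) [])).size = n := by
  induction is with
  | nil => simp [pvColPass]
  | cons i rest ih =>
      simp only [pvColPass, List.mem_cons]
      by_cases h : (PySem.Dict.counter ((PySem.List.pyRange 0 (n : Int) 1).foldl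
        (fun t j => t ++ [PySem.List.pyGetD (PySem.List.pyGetD m j []) i 0]) [])).size = n <;>
        simp [h, ih]

-- A's temp list for column i is the pointwise i-th projection of m
theorem pv_temp_eq (m : List (List Int)) (i : Int) :
    (PySem.List.pyRange 0 (m.length : Int) 1).foldl
        (fun t j => t ++ [PySem.List.pyGetD (PySem.List.pyGetD m j []) i 0]) []
      = m.map (fun row => PySem.List.pyGetD row i 0) := by
  rw [PySem.List.foldl_append_singleton_eq_map]
  have h1 : (PySem.List.pyRange 0 (m.length : Int) 1).map
      (fun j => PySem.List.pyGetD (PySem.List.pyGetD m j []) i 0)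
      = ((PySem.List.pyRange 0 (m.length : Int) 1).map
          (fun j => PySem.List.pyGetD m j [])).map (fun row => PySem.List.pyGetD row i 0) := by
    rw [List.map_map]; rfl
  rw [h1, PySem.List.map_pyGetD_pyRange_zero']
  simp

-- B inner loop: full characterisation (column duplicate found vs updated column sets)
theorem pv_scanRow_eq (vs : List Int) : ∀ (cs : List (PySem.Set Int)),
    cs.length ≤ vs.length →
    ((List.Forall₂ (fun v s => v ∉ s) (vs.take cs.length) cs ∧
        pvScanRow vs cs = some (List.zipWith (fun v s => PySem.Set.add s v) vs cs)) ∨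
      (¬ List.Forall₂ (fun v s => v ∉ s) (vs.take cs.length) cs ∧
        pvScanRow vs cs = none)) := by
  induction vs with
  | nil =>
    intro cs hlen
    have : cs = [] := List.length_eq_zero_iff.mp (by simpa using hlen)
    subst this
    left; exact ⟨List.Forall₂.nil, rfl⟩
  | cons v vs ih =>
    intro cs hlen
    cases cs with
    | nil => left; exact ⟨List.Forall₂.nil, rfl⟩
    | cons s cs =>
      simp only [List.length_cons] at hlen
      by_cases hmem : v ∈ s
      · right
        constructor
        · rintro (_ | ⟨hvs, _⟩); exact hvs hmem
        · simp only [pvScanRow]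
          rw [if_pos (by simp [PySem.Set.contains_iff, hmem])]
      · have hcond : ¬(PySem.Set.contains s v = true) := by
          simp [PySem.Set.contains_iff, hmem]
        rcases ih cs (by omega) with ⟨hf2, heq⟩ | ⟨hf2, heq⟩
        · left
          refine ⟨?_, ?_⟩
          · exact List.Forall₂.cons hmem hf2
          · simp only [pvScanRow, if_neg hcond, heq, Option.map_some, List.zipWith_cons_cons]
        · right
          refine ⟨?_, ?_⟩
          · rintro (_ | ⟨_, hf2'⟩); exact hf2 hf2'
          · simp only [pvScanRow, if_neg hcond, heq, Option.map_none]

-- columns-so-far invariant of the sweep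
def pvColsOk (rows : List (List Int)) (cs : List (PySem.Set Int)) : Prop :=
  ∀ j < cs.length, (rows.map (fun r => r.getD j (0 : Int))).Nodup ∧
    ∀ v ∈ rows.map (fun r => r.getD j (0 : Int)), v ∉ cs.getD j []

theorem pv_scanAll_iff (n : Nat) (rows : List (List Int)) : ∀ (cs : List (PySem.Set Int)),
    cs.length = n →
    (pvScanAll n rows cs = true ↔
      (∀ row ∈ rows, (PySem.Set.ofList row).length = n) ∧ pvColsOk rows cs) := by
  induction rows with
  | nil =>
    intro cs _
    simp only [pvScanAll, List.not_mem_nil, pvColsOk, List.map_nil, List.nodup_nil]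
    simp
  | cons row rest ih =>
    intro cs hcs
    by_cases hgood : (PySem.Set.ofList row).length = n
    case neg =>
      have step : pvScanAll n (row :: rest) cs = false := by
        simp only [pvScanAll]; rw [if_pos (by omega)]
      rw [step]
      refine iff_of_false (by simp) ?_
      rintro ⟨hd, _⟩
      exact hgood (hd row (by simp))
    case pos =>
      have hrowlen : cs.length ≤ row.length := by
        have := PySem.Set.length_ofList_le (xs := row)
        omega
      rcases pv_scanRow_eq row cs hrowlen with ⟨hf2, heq⟩ | ⟨hf2, heq⟩
      · -- row fresh against all columns: recurse
        set zw := List.zipWith (fun v s => PySem.Set.add s v) row cs with hzw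
        have hzwlen : zw.length = cs.length := by simp [hzw]; omega
        have step : pvScanAll n (row :: rest) cs = pvScanAll n rest zw := by
          simp only [pvScanAll]; rw [if_neg (by omega)]; simp only [heq]
        rw [step, ih zw (by omega)]
        have hget : ∀ j (hj : j < cs.length), (row.take cs.length).getD j 0 = row.getD j 0 := by
          intro j hj
          have h1 : j < (row.take cs.length).length := by simp; omega
          rw [List.getD_eq_getElem _ 0 h1, List.getD_eq_getElem row 0 (by omega),
            List.getElem_take]
        -- pointwise fact: row's j-th value is fresh in column j
        have hptw : ∀ j (hj : j < cs.length), row.getD j 0 ∉ cs.getD j [] := by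
          intro j hj
          rcases List.forall₂_iff_get.mp hf2 with ⟨hl, hgetf⟩
          have h1 : j < (row.take cs.length).length := by simp; omega
          have := hgetf j h1 hj
          simp only [List.get_eq_getElem] at this
          rw [← List.getD_eq_getElem _ 0 h1, ← List.getD_eq_getElem cs [] hj, hget j hj] at this
          exact this
        have hzwget : ∀ j (hj : j < cs.length),
            zw.getD j [] = PySem.Set.add (cs.getD j []) (row.getD j 0) := by
          intro j hj
          have hjz : j < zw.length := by omega
          rw [List.getD_eq_getElem zw [] hjz, List.getD_eq_getElem cs [] hj,
            List.getD_eq_getElem row 0 (by omega)]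
          simp only [hzw, List.getElem_zipWith]
        constructor
        · rintro ⟨hds, hcols⟩
          refine ⟨?_, ?_⟩
          · intro r hr; rcases List.mem_cons.mp hr with rfl | hr
            · exact hgood
            · exact hds r hr
          · intro j hj
            obtain ⟨hcnd, hcmem⟩ := hcols j (by omega)
            rw [hzwget j hj] at hcmem
            rw [List.map_cons, List.nodup_cons]
            have hnotail : row.getD j 0 ∉ rest.map (fun r => r.getD j (0:Int)) := by
              intro hc
              exact (hcmem _ hc) (by simp [PySem.Set.mem_add])
            refine ⟨⟨hnotail, hcnd⟩, ?_⟩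
            intro v hv
            rcases List.mem_cons.mp hv with rfl | hv
            · exact hptw j hj
            · intro hc
              exact (hcmem v hv) (by simp only [PySem.Set.mem_add]; exact Or.inl hc)
        · rintro ⟨hds, hcols⟩
          refine ⟨fun r hr => hds r (by simp [hr]), ?_⟩
          intro j hj
          have hj' : j < cs.length := by omega
          obtain ⟨hcnd, hcmem⟩ := hcols j hj'
          rw [List.map_cons] at hcnd hcmem
          rcases List.nodup_cons.mp hcnd with ⟨hhead, htail⟩
          refine ⟨htail, ?_⟩
          intro v hv
          rw [hzwget j hj']
          simp only [PySem.Set.mem_add]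
          rintro (hc | hc)
          · exact hcmem v (List.mem_cons_of_mem _ hv) hc
          · exact hhead (hc ▸ hv)
      · -- a duplicate in some column: both sides false
        have step : pvScanAll n (row :: rest) cs = false := by
          simp only [pvScanAll]; rw [if_neg (by omega)]; simp only [heq]
        rw [step]
        refine iff_of_false (by simp) ?_
        rintro ⟨_, hcols⟩
        apply hf2
        rw [List.forall₂_iff_get]
        refine ⟨by simp; omega, ?_⟩
        intro j hj1 hj2
        obtain ⟨_, hcmem⟩ := hcols j hj2
        have hm : row.getD j 0 ∈ (row :: rest).map (fun r => r.getD j (0:Int)) := by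
          rw [List.map_cons]; exact List.mem_cons_self
        have hx := hcmem _ hm
        have h1 : j < (row.take cs.length).length := by simp; omega
        rw [List.getD_eq_getElem row 0 (by omega), List.getD_eq_getElem cs [] hj2] at hx
        have hgj : (row.take cs.length)[j]'h1 = row[j]'(by omega) := List.getElem_take
        simp only [List.get_eq_getElem]
        rw [hgj]
        exact hx

theorem pv_A_iff (m : List (List Int)) :
    Solution m = true ↔ (∀ row ∈ m, (PySem.Set.ofList row).length = m.length) ∧
      ∀ j < m.length, (m.map (fun r => r.getD j (0 : Int))).Nodup := by
  constructor
  · intro hs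
    have hsp : pvRowPass m.length m = true ∧
        pvColPass m m.length (PySem.List.pyRange 0 (m.length : Int) 1) = true := by
      unfold Solution at hs
      by_cases h1 : pvRowPass m.length m = true
      · simp [h1] at hs; exact ⟨h1, hs⟩
      · simp [h1] at hs
    obtain ⟨h1, h2⟩ := hsp
    constructor
    · intro row hr
      have := (pv_rowPass_iff _ _).mp h1 row hr
      rwa [pv_counter_size] at this
    · intro j hj
      have hi : (j : Int) ∈ PySem.List.pyRange 0 (m.length : Int) 1 := by
        rw [PySem.List.mem_pyRange_one]; omega
      have := (pv_colPass_iff m m.length _).mp h2 _ hi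
      rw [pv_temp_eq, pv_counter_size] at this
      have hcol := (pv_lenOfList_eq_iff (m.map (fun row => PySem.List.pyGetD row (j : Int) 0))).mp
        (by rw [List.length_map]; exact this)
      have hmap : m.map (fun row => PySem.List.pyGetD row (j : Int) 0)
          = m.map (fun r => r.getD j (0 : Int)) := by
        apply List.map_congr_left; intro r _
        rw [PySem.List.pyGetD_natCast]
      rwa [hmap] at hcol
  · rintro ⟨hrows, hcols⟩
    have h1 : pvRowPass m.length m = true := by
      rw [pv_rowPass_iff]
      intro row hr
      rw [pv_counter_size]; exact hrows row hr
    have h2 : pvColPass m m.length (PySem.List.pyRange 0 (m.length : Int) 1) = true := by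
      rw [pv_colPass_iff]
      intro i hi
      rw [PySem.List.mem_pyRange_one] at hi
      rw [pv_temp_eq, pv_counter_size]
      have hmap : m.map (fun row => PySem.List.pyGetD row i 0)
          = m.map (fun r => r.getD i.toNat (0 : Int)) := by
        apply List.map_congr_left; intro r _
        have hi2 : i = ((i.toNat : Nat) : Int) := by omega
        conv_lhs => rw [hi2]
        rw [PySem.List.pyGetD_natCast]
      rw [hmap, (pv_lenOfList_eq_iff _).mpr (hcols i.toNat (by omega))]
      simp
    unfold Solution
    simp [h1, h2]

theorem pv_B_iff (m : List (List Int)) :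
    Solution_alt m = true ↔ (∀ row ∈ m, (PySem.Set.ofList row).length = m.length) ∧
      ∀ j < m.length, (m.map (fun r => r.getD j (0 : Int))).Nodup := by
  unfold Solution_alt
  have hcs0 : (List.range m.length).map (fun _ => (PySem.Set.empty : PySem.Set Int))
      = List.replicate m.length PySem.Set.empty := by
    rw [List.map_const', List.length_range]
  rw [hcs0, pv_scanAll_iff m.length m _ (by simp)]
  have : pvColsOk m (List.replicate m.length PySem.Set.empty) ↔
      ∀ j < m.length, (m.map (fun r => r.getD j (0 : Int))).Nodup := by
    unfold pvColsOk
    simp only [List.length_replicate]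
    constructor
    · intro hc j hj; exact (hc j hj).1
    · intro hc j hj
      refine ⟨hc j hj, ?_⟩
      intro v _
      rw [List.getD_eq_getElem _ [] (by simpa using hj), List.getElem_replicate]
      intro hv; cases hv
  rw [this]

-- ===== VERDICT (by name: the statement is the Claim_ definition above) =====
theorem Solution_spec : Claim_equal_Solution := by
  intro m _
  unfold Spec_Solution
  exact Bool.eq_iff_iff.mpr ((pv_A_iff m).trans (pv_B_iff m).symm)
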